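-- pv_equiv track=rewrite | github.com/masamasamasato/python | Codility_12.py | solution
-- ===== SOURCE A (Python) =====
-- def solution(A):
--     len_A = len(A)
--     i = 0
--     count_list = []
--
--     while A[i] != 0:
--         if i < len_A:
--             i +=1
--         break
--
--     while i < len_A:
--         if A[i] == 0:
--             count_list.append(0)
--         else:
--             count_list = list(map(lambda x: x+1,count_list))
--         i +=1
--     return sum(count_list)
-- ===== SOURCE B (Python) =====
-- def solution(A):
--     zeros = 0
--     total = 0
--     for x in A:
--         if x == 0:
--             zeros += 1
--         else:
--             total += zeros
--     return total
-- ===== Notes on version B (the rewrite author's own statement) =====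
-- stated objective: faster
-- what changed: Replaced the quadratic rebuild of a per-zero counter list (mapping +1 over it for every nonzero and summing at the end) by a single pass that keeps a running zero count and adds it to the total at each nonzero.
import Mathlib
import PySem

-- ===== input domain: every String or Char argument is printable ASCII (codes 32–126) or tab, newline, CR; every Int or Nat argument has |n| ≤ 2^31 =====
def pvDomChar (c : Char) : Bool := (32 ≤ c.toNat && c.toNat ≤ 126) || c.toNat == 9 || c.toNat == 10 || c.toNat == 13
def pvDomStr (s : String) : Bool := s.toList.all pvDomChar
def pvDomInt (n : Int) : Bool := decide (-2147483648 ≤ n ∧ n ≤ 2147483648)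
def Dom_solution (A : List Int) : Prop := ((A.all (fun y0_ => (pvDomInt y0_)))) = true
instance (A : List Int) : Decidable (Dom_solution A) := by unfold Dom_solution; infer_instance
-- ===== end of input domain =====

-- B replaces A's quadratic counter-list rebuild by a single pass with a running zero count (O(n) vs O(n^2)).

-- ===== PORT A =====
def solution (A : List Int) : Int :=
  let lenA : Int := A.length
  -- first while loop: checks A[0] (IndexError on empty, excluded by Pre_), runs at most once, then breaks
  let i : Int :=
    match PySem.List.pyGet? A 0 with
    | none => 0   -- IndexError in Python; unreachable under Pre_solution
    | some a0 => if a0 ≠ 0 then (if (0:Int) < lenA then 1 else 0) else 0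
  -- second while loop over indices i..len-1, building count_list
  let count_list : List Int :=
    (PySem.List.pyRange i lenA 1).foldl
      (fun cl j => if PySem.List.pyGetD A j 0 = 0 then cl ++ [0] else cl.map (fun x => x + 1)) []
  count_list.sum

-- ===== PORT B =====
def solution_alt (A : List Int) : Int :=
  (A.foldl (fun s x => if x = 0 then (s.1 + 1, s.2) else (s.1, s.2 + s.1))
    ((0 : Int), (0 : Int))).2

-- ===== PRECONDITION & SPEC =====
-- Pre_ excludes only the empty list, on which A raises IndexError (indexing the first element in the first while condition).
def Pre_solution (A : List Int) : Prop := A ≠ []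
instance (A : List Int) : Decidable (Pre_solution A) := by unfold Pre_solution; infer_instance
def pvWitness_solution : List Int := ([0, 1, 0, 2])

def Spec_solution (A : List Int) (out : Int) : Prop := out = solution_alt A
instance (A : List Int) (out : Int) : Decidable (Spec_solution A out) := by unfold Spec_solution; infer_instance

-- ===== CLAIM (what is proved, stated in full; the proofs are below) =====
def Claim_equal_solution : Prop := ∀ (A : List Int), Dom_solution A → Pre_solution A → Spec_solution A (solution A)

-- ===== LEMMAS AND PROOFS =====

-- loop body of A's second while loop, as a function of the current element
def astep (cl : List Int) (x : Int) : List Int :=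
  if x = 0 then cl ++ [0] else cl.map (fun y => y + 1)

-- loop body of B
def bstep (s : Int × Int) (x : Int) : Int × Int :=
  if x = 0 then (s.1 + 1, s.2) else (s.1, s.2 + s.1)

-- number of nonzero elements
def nz : List Int → Int
  | [] => 0
  | x :: L => (if x = 0 then 0 else 1) + nz L

theorem sum_map_succ (cl : List Int) : (cl.map (fun y => y + 1)).sum = cl.sum + cl.length := by
  induction cl with
  | nil => simp
  | cons a cl ih => simp [ih]; ring

theorem bstep_zero (z t : Int) : bstep (z, t) 0 = (z + 1, t) := by simp [bstep]

theorem bstep_nonzero (z t x : Int) (hx : x ≠ 0) : bstep (z, t) x = (z, t + z) := by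
  simp [bstep, hx]

theorem astep_zero (cl : List Int) : astep cl 0 = cl ++ [0] := by simp [astep]

theorem astep_nonzero (cl : List Int) (x : Int) (hx : x ≠ 0) :
    astep cl x = cl.map (fun y => y + 1) := by simp [astep, hx]

theorem nz_cons (x : Int) (L : List Int) : nz (x :: L) = (if x = 0 then 0 else 1) + nz L := rfl

theorem bstep_gen (L : List Int) : ∀ z t : Int,
    (L.foldl bstep (z, t)).2 = t + z * nz L + (L.foldl bstep (0, 0)).2 := by
  induction L with
  | nil => intro z t; simp [nz]
  | cons x L ih =>
    intro z t
    by_cases hx : x = 0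
    · subst hx
      rw [List.foldl_cons, List.foldl_cons, bstep_zero, bstep_zero, ih (z + 1) t, ih (0 + 1) 0,
        nz_cons]
      norm_num
      ring
    · rw [List.foldl_cons, List.foldl_cons, bstep_nonzero _ _ _ hx, bstep_nonzero _ _ _ hx,
        ih z (t + z), nz_cons]
      simp only [if_neg hx]
      ring

theorem astep_gen (L : List Int) : ∀ cl : List Int,
    (L.foldl astep cl).sum = cl.sum + (cl.length : Int) * nz L + (L.foldl bstep (0, 0)).2 := by
  induction L with
  | nil => intro cl; simp [nz]
  | cons x L ih =>
    intro cl
    by_cases hx : x = 0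
    · subst hx
      rw [List.foldl_cons, List.foldl_cons, astep_zero, bstep_zero, ih (cl ++ [0]),
        bstep_gen L (0 + 1) 0, nz_cons]
      simp
      ring
    · rw [List.foldl_cons, List.foldl_cons, astep_nonzero _ _ hx, bstep_nonzero _ _ _ hx,
        ih (cl.map (fun y => y + 1)), sum_map_succ, nz_cons]
      simp only [if_neg hx, List.length_map]
      ring

-- ===== VERDICT (by name: the statement is the Claim_ definition above) =====
theorem solution_spec : Claim_equal_solution := by
  intro A _ hpre
  unfold Spec_solution solution solution_alt
  obtain ⟨a, L, rfl⟩ := List.exists_cons_of_ne_nil hpre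
  simp only [PySem.List.pyGet?_zero_cons]
  by_cases ha : a = 0
  · simp only [ha, ne_eq, not_true_eq_false, if_false]
    rw [show (fun cl j => if PySem.List.pyGetD ((0:Int) :: L) j 0 = 0 then cl ++ [(0:Int)]
          else cl.map (fun x => x + 1))
        = (fun cl j => astep cl (PySem.List.pyGetD ((0:Int) :: L) j 0)) from rfl]
    rw [PySem.List.foldl_pyRange_zero_pyGetD' ((0:Int) :: L) 0 astep []]
    rw [astep_gen ((0:Int) :: L) []]
    rw [show ∀ M : List Int, M.foldl bstep (0,0)
        = M.foldl (fun s x => if x = 0 then (s.1 + 1, s.2) else (s.1, s.2 + s.1)) (0,0)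
        from fun M => rfl]
    simp
  · have hlen : (0:Int) < ((a :: L).length : Int) := by
      simp
    simp only [ha, ne_eq, not_false_eq_true, if_true, if_pos hlen]
    rw [show (fun cl j => if PySem.List.pyGetD (a :: L) j 0 = 0 then cl ++ [(0:Int)]
          else cl.map (fun x => x + 1))
        = (fun cl j => astep cl (PySem.List.pyGetD (a :: L) j 0)) from rfl]
    rw [PySem.List.foldl_pyRange_pyGetD' (a := 1) (a :: L) 0 astep [] (by omega)]
    simp only [show ((1:Int)).toNat = 1 from rfl, List.drop_succ_cons, List.drop_zero]
    rw [astep_gen L []]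
    rw [show ∀ M : List Int, M.foldl bstep (0,0)
        = M.foldl (fun s x => if x = 0 then (s.1 + 1, s.2) else (s.1, s.2 + s.1)) (0,0)
        from fun M => rfl]
    simp [ha]
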